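-- pv_equiv track=rewrite | github.com/aarajbhattarai/fissure-voice-agent-python | src/agents/user_data.py | merge_user_data
-- ===== SOURCE A (Python) =====
-- def merge_user_data(base: dict, overrides: dict) -> dict:
--     """
--     Merge user data dictionaries.
--
--     Args:
--         base: Base user data
--         overrides: Override values
--
--     Returns:
--         Merged dictionary
--     """
--     merged = {**base}
--
--     for key, value in overrides.items():
--         if key == "custom_fields" and key in merged:
--             # Deep merge custom fields
--             merged[key] = {**merged[key], **value}
--         else:
--             merged[key] = value
--
--     return merged
-- ===== SOURCE B (Python) =====
-- def merge_user_data(base: dict, overrides: dict) -> dict: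
--     """Merge user data.
--
--     Value-centric construction: a pure function gives each key its final
--     merged value; the result is the base-ordered entries followed by the
--     override entries whose keys are new, with no dict mutation.
--     """
--     def final_value(key):
--         if key == "custom_fields" and key in overrides:
--             return {**base[key], **overrides[key]}
--         return overrides.get(key, base[key])
--
--     head = [(k, final_value(k)) for k in base]
--     tail = [(k, v) for k, v in overrides.items() if k not in base]
--     return dict(head + tail)
-- ===== Notes on version B (the rewrite author's own statement) =====
-- stated objective: alternative
-- what changed: Replaces A's merge-by-mutation loop (copy base, then overwrite/deep-merge key by key) with a value-centric construction: a pure per-key function computes each key's final value, the result is built as the list of base-ordered entries concatenated with the novel override entries, and no dict is mutated; Pre_ only requires distinct keys in each association list, which is automatic for any real Python dict.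
import Mathlib
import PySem

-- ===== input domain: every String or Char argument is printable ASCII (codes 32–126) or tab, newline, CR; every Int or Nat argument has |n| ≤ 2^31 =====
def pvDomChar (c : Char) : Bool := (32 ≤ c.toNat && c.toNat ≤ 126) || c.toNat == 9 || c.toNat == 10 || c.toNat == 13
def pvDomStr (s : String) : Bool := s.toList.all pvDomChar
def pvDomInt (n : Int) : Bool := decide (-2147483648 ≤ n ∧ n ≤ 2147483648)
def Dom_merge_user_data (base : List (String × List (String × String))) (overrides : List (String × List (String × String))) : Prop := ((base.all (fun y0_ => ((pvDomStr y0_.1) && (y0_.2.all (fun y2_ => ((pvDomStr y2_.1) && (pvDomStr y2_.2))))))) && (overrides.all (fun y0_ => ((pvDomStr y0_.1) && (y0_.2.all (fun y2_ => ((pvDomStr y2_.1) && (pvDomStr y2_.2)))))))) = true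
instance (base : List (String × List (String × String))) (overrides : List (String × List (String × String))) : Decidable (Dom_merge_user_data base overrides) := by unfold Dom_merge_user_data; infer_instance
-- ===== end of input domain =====

-- B replaces A's merge-by-mutation loop by a value-centric construction: a pure per-key
-- function gives each key its final value, and the result is base-ordered entries ++ novel
-- override entries, with no dict mutation; objective: alternative decomposition.


-- ===== PORT A =====
-- merged = {**base}; for key, value in overrides.items(): if key == "custom_fields" and key in merged:
--   merged[key] = {**merged[key], **value} else merged[key] = value; return merged
def merge_user_data (base : List (String × List (String × String))) (overrides : List (String × List (String × String))) : List (String × List (String × String)) :=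
  (overrides.foldl
    (fun m kv =>
      if kv.1 == "custom_fields" && m.contains kv.1 then
        m.insert kv.1 (((PySem.Dict.ofList (m.getD kv.1 [])).update kv.2).items)
      else
        m.insert kv.1 kv.2)
    (PySem.Dict.ofList base)).items

-- ===== PORT B =====
-- def final_value(key): if key == "custom_fields" and key in overrides: return {**base[key], **overrides[key]}
--   return overrides.get(key, base[key])
-- (base[key] is only evaluated with key in base, so getD is exact here)
def pvFinalValue (base : List (String × List (String × String))) (overrides : List (String × List (String × String))) (key : String) : List (String × String) :=
  if key == "custom_fields" && (PySem.Dict.ofList overrides).contains key then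
    ((PySem.Dict.ofList ((PySem.Dict.ofList base).getD key [])).update
      ((PySem.Dict.ofList overrides).getD key [])).items
  else
    ((PySem.Dict.ofList overrides).get? key).getD ((PySem.Dict.ofList base).getD key [])

-- head = [(k, final_value(k)) for k in base]; tail = [(k, v) for k, v in overrides.items() if k not in base]
-- return dict(head + tail)
def merge_user_data_alt (base : List (String × List (String × String))) (overrides : List (String × List (String × String))) : List (String × List (String × String)) :=
  let head := base.map (fun kv => (kv.1, pvFinalValue base overrides kv.1))
  let tail := overrides.filter (fun kv => !(PySem.Dict.ofList base).contains kv.1)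
  (PySem.Dict.ofList (head ++ tail)).items

-- ===== PRECONDITION & SPEC =====
-- Pre_ excludes association lists that repeat a key: a Python dict never has duplicate keys,
-- so those lists correspond to no Python input of A at all.
def Pre_merge_user_data (base : List (String × List (String × String))) (overrides : List (String × List (String × String))) : Prop :=
  (base.map Prod.fst).Nodup ∧ (overrides.map Prod.fst).Nodup
instance (base : List (String × List (String × String))) (overrides : List (String × List (String × String))) : Decidable (Pre_merge_user_data base overrides) := by unfold Pre_merge_user_data; infer_instance

def pvWitness_merge_user_data : (List (String × List (String × String))) × (List (String × List (String × String))) :=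
  ([("custom_fields", [("a", "1")]), ("x", [])],
   [("custom_fields", [("b", "2")]), ("y", [("k", "v")])])

def Spec_merge_user_data (base : List (String × List (String × String))) (overrides : List (String × List (String × String))) (out : List (String × List (String × String))) : Prop := out = merge_user_data_alt base overrides
instance (base : List (String × List (String × String))) (overrides : List (String × List (String × String))) (out : List (String × List (String × String))) : Decidable (Spec_merge_user_data base overrides out) := by unfold Spec_merge_user_data; infer_instance

-- ===== CLAIM (what is proved, stated in full; the proofs are below) =====
def Claim_equal_merge_user_data : Prop := ∀ (base : List (String × List (String × String))) (overrides : List (String × List (String × String))), Dom_merge_user_data base overrides → Pre_merge_user_data base overrides → Spec_merge_user_data base overrides (merge_user_data base overrides)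

-- ===== LEMMAS AND PROOFS =====

-- lookups through an update only depend on the starting dict's lookup at that key
theorem pv_get?_update_congr {ν : Type} (t : List (String × ν)) (d d' : PySem.Dict String ν)
    (k0 : String) (h : d.get? k0 = d'.get? k0) :
    (d.update t).get? k0 = (d'.update t).get? k0 := by
  induction t generalizing d d' with
  | nil => exact h
  | cons p t ih =>
      exact ih (d.insert p.1 p.2) (d'.insert p.1 p.2)
        (by rw [PySem.Dict.get?_insert, PySem.Dict.get?_insert]; split_ifs with h1 <;> simp [h])

-- a key absent from the updating list keeps its lookup
theorem pv_get?_update_of_not_mem {ν : Type} (t : List (String × ν)) (d : PySem.Dict String ν)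
    (k0 : String) (h : k0 ∉ t.map Prod.fst) :
    (d.update t).get? k0 = d.get? k0 := by
  induction t generalizing d with
  | nil => rfl
  | cons p t ih =>
      simp only [List.map_cons, List.mem_cons, not_or] at h
      rw [show d.update (p :: t) = (d.insert p.1 p.2).update t from rfl, ih _ h.2,
        PySem.Dict.get?_insert_of_ne _ _ h.1]

-- membership after an update
theorem pv_contains_update {ν : Type} (t : List (String × ν)) (d : PySem.Dict String ν)
    (k0 : String) :
    (d.update t).contains k0 = (d.contains k0 || (t.map Prod.fst).contains k0) := by
  induction t generalizing d with
  | nil => simp [PySem.Dict.update]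
  | cons p t ih =>
      rw [show d.update (p :: t) = (d.insert p.1 p.2).update t from rfl, ih,
        PySem.Dict.contains_insert, List.map_cons, List.contains_cons]
      by_cases h1 : k0 = p.1
      · simp [h1]
      · have hb : (k0 == p.1) = false := by simp [h1]
        rw [hb]
        simp

-- a key absent from a list is not in its dict: getD returns the default
theorem pv_getD_ofList_not_mem {ν : Type} (t : List (String × ν)) (k : String) (d0 : ν)
    (h : k ∉ t.map Prod.fst) :
    (PySem.Dict.ofList t).getD k d0 = d0 := by
  rw [PySem.Dict.getD_eq_get?_getD,
    show PySem.Dict.ofList t = PySem.Dict.empty.update t from rfl,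
    pv_get?_update_of_not_mem t _ k h, PySem.Dict.get?_empty]
  rfl

-- two inserts at distinct keys commute when the first key is already present
theorem pv_insert_comm_of_contains {ν : Type} (d : PySem.Dict String ν)
    (k : String) (w : ν) (p1 : String) (p2 : ν) (hc : d.contains k = true) (hne : p1 ≠ k) :
    (d.insert k w).insert p1 p2 = (d.insert p1 p2).insert k w := by
  apply PySem.Dict.ext
  by_cases hp : d.contains p1 = true
  · rw [PySem.Dict.items_insert_of_contains _ _ (show (d.insert k w).contains p1 = true by
        rw [PySem.Dict.contains_insert, hp]; simp),
      PySem.Dict.items_insert_of_contains _ _ hc,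
      PySem.Dict.items_insert_of_contains _ _ (show (d.insert p1 p2).contains k = true by
        rw [PySem.Dict.contains_insert, hc]; simp),
      PySem.Dict.items_insert_of_contains _ _ hp, List.map_map, List.map_map]
    apply List.map_congr_left
    intro x _
    by_cases h1 : x.1 = k <;> by_cases h2 : x.1 = p1 <;>
      simp_all [Function.comp, Ne.symm hne]
  · rw [PySem.Dict.items_insert_of_not_contains _ _ (show (d.insert k w).contains p1 = false by
        rw [PySem.Dict.contains_insert, Bool.eq_false_iff.mpr hp]
        simp [hne]),
      PySem.Dict.items_insert_of_contains _ _ hc,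
      PySem.Dict.items_insert_of_contains _ _ (show (d.insert p1 p2).contains k = true by
        rw [PySem.Dict.contains_insert, hc]; simp),
      PySem.Dict.items_insert_of_not_contains _ _ (Bool.eq_false_iff.mpr hp), List.map_append]
    simp [hne]

-- inserting at a present key commutes with updating by a list avoiding that key
theorem pv_insert_update_comm {ν : Type} (t : List (String × ν)) (d : PySem.Dict String ν)
    (k : String) (w : ν) (hc : d.contains k = true) (h : k ∉ t.map Prod.fst) :
    (d.insert k w).update t = (d.update t).insert k w := by
  induction t generalizing d with
  | nil => rfl
  | cons p t ih =>
      simp only [List.map_cons, List.mem_cons, not_or] at h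
      rw [show (d.insert k w).update (p :: t) = ((d.insert k w).insert p.1 p.2).update t from rfl,
        pv_insert_comm_of_contains d k w p.1 p.2 hc (fun he => h.1 he.symm)]
      exact ih (d.insert p.1 p.2) (by rw [PySem.Dict.contains_insert, hc]; simp) h.2

-- getD on ofList of a cons, at another key
theorem pv_getD_ofList_cons_ne {ν : Type} (p : String × ν) (t : List (String × ν))
    (k : String) (d0 : ν) (h : k ≠ p.1) :
    (PySem.Dict.ofList (p :: t)).getD k d0 = (PySem.Dict.ofList t).getD k d0 := by
  rw [PySem.Dict.getD_eq_get?_getD, PySem.Dict.getD_eq_get?_getD,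
    show PySem.Dict.ofList (p :: t) = (PySem.Dict.empty.insert p.1 p.2).update t from rfl,
    show PySem.Dict.ofList t = PySem.Dict.empty.update t from rfl,
    pv_get?_update_congr t _ PySem.Dict.empty k (PySem.Dict.get?_insert_of_ne _ _ h)]

-- getD on ofList of a cons, at the head key, when the tail avoids it
theorem pv_getD_ofList_cons_self {ν : Type} (p : String × ν) (t : List (String × ν))
    (d0 : ν) (h : p.1 ∉ t.map Prod.fst) :
    (PySem.Dict.ofList (p :: t)).getD p.1 d0 = p.2 := by
  rw [PySem.Dict.getD_eq_get?_getD,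
    show PySem.Dict.ofList (p :: t) = (PySem.Dict.empty.insert p.1 p.2).update t from rfl,
    pv_get?_update_of_not_mem t _ p.1 h, PySem.Dict.get?_insert_self]
  rfl

-- ofList of a list with distinct keys keeps it as the items list
theorem pv_items_ofList {ν : Type} (l : List (String × ν)) (h : (l.map Prod.fst).Nodup) :
    (PySem.Dict.ofList l).items = l := by
  have := PySem.Dict.items_foldl_insert_fresh l Prod.fst Prod.snd PySem.Dict.empty
    (fun a _ => PySem.Dict.contains_empty a.1) h
  simpa using this

-- closed form of an update's items, for updating lists with distinct keys
theorem pv_items_update {ν : Type} (l : List (String × ν)) (d : PySem.Dict String ν)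
    (hnd : (l.map Prod.fst).Nodup) :
    (d.update l).items =
      d.items.map (fun kv => (kv.1, (PySem.Dict.ofList l).getD kv.1 kv.2)) ++
      l.filter (fun kv => !d.contains kv.1) := by
  induction l generalizing d with
  | nil =>
      have : ∀ kv ∈ d.items,
          (fun kv => (kv.1, (PySem.Dict.ofList ([] : List (String × ν))).getD kv.1 kv.2)) kv = kv := by
        intro kv _
        simp [show PySem.Dict.ofList ([] : List (String × ν)) = PySem.Dict.empty from rfl,
          PySem.Dict.getD_empty]
      simp [PySem.Dict.update, List.map_congr_left this]
  | cons p t ih =>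
      simp only [List.map_cons, List.nodup_cons] at hnd
      obtain ⟨hp, hnd⟩ := hnd
      rw [show d.update (p :: t) = (d.insert p.1 p.2).update t from rfl, ih _ hnd]
      by_cases hc : d.contains p.1 = true
      · rw [PySem.Dict.items_insert_of_contains _ _ hc, List.map_map]
        have hmap : ∀ kv ∈ d.items,
            ((fun kv => (kv.1, (PySem.Dict.ofList t).getD kv.1 kv.2)) ∘
              (fun q => if q.1 == p.1 then (p.1, p.2) else q)) kv =
            (kv.1, (PySem.Dict.ofList (p :: t)).getD kv.1 kv.2) := by
          intro kv _
          by_cases hk : kv.1 = p.1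
          · simp only [Function.comp, hk, beq_self_eq_true, if_true,
              pv_getD_ofList_not_mem t p.1 p.2 hp,
              pv_getD_ofList_cons_self p t kv.2 hp]
          · have hb : (kv.1 == p.1) = false := by simp [hk]
            simp only [Function.comp, hb, Bool.false_eq_true, if_false,
              pv_getD_ofList_cons_ne p t kv.1 kv.2 hk]
        have hfil : t.filter (fun kv => !(d.insert p.1 p.2).contains kv.1) =
            t.filter (fun kv => !d.contains kv.1) := by
          apply List.filter_congr
          intro kv hkv
          have hk : kv.1 ≠ p.1 := fun he => hp (he ▸ List.mem_map_of_mem hkv)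
          rw [PySem.Dict.contains_insert]
          simp [hk]
        rw [List.map_congr_left hmap, hfil,
          show (p :: t).filter (fun kv => !d.contains kv.1) =
            t.filter (fun kv => !d.contains kv.1) by simp [hc]]
      · have hcf : d.contains p.1 = false := Bool.eq_false_iff.mpr hc
        rw [PySem.Dict.items_insert_of_not_contains _ _ hcf, List.map_append]
        have hmap : ∀ kv ∈ d.items,
            (fun kv => (kv.1, (PySem.Dict.ofList t).getD kv.1 kv.2)) kv =
            (kv.1, (PySem.Dict.ofList (p :: t)).getD kv.1 kv.2) := by
          intro kv hkv
          have hk : kv.1 ≠ p.1 := by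
            intro he
            have : d.contains kv.1 = true := by
              rw [PySem.Dict.contains_iff_mem_keys]
              exact PySem.Dict.mem_keys_of_mem_items d hkv
            rw [he] at this
            simp [this] at hcf
          simp only [pv_getD_ofList_cons_ne p t kv.1 kv.2 hk]
        have hfil : t.filter (fun kv => !(d.insert p.1 p.2).contains kv.1) =
            t.filter (fun kv => !d.contains kv.1) := by
          apply List.filter_congr
          intro kv hkv
          have hk : kv.1 ≠ p.1 := fun he => hp (he ▸ List.mem_map_of_mem hkv)
          rw [PySem.Dict.contains_insert]
          simp [hk]
        rw [List.map_congr_left hmap, hfil,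
          show [(p.1, p.2)].map (fun kv => (kv.1, (PySem.Dict.ofList t).getD kv.1 kv.2)) =
            [(p.1, p.2)] by
            simp [pv_getD_ofList_not_mem t p.1 p.2 hp],
          show (p :: t).filter (fun kv => !d.contains kv.1) =
            (p.1, p.2) :: t.filter (fun kv => !d.contains kv.1) by
            simp [hcf]]
        rw [List.append_assoc]
        rfl

-- closed form of A's fold, for override lists with distinct keys
theorem pv_foldA_closed (l : List (String × List (String × String)))
    (d : PySem.Dict String (List (String × String)))
    (hnd : (l.map Prod.fst).Nodup) :
    l.foldl
      (fun m kv =>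
        if kv.1 == "custom_fields" && m.contains kv.1 then
          m.insert kv.1 (((PySem.Dict.ofList (m.getD kv.1 [])).update kv.2).items)
        else
          m.insert kv.1 kv.2) d =
    (if d.contains "custom_fields" && (l.map Prod.fst).contains "custom_fields" then
      (d.update l).insert "custom_fields"
        (((PySem.Dict.ofList (d.getD "custom_fields" [])).update
          ((PySem.Dict.ofList l).getD "custom_fields" [])).items)
    else d.update l) := by
  induction l generalizing d with
  | nil => simp [PySem.Dict.update]
  | cons kv t ih =>
      obtain ⟨k, v⟩ := kv
      simp only [List.map_cons, List.nodup_cons] at hnd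
      obtain ⟨hk_notin, hnd_t⟩ := hnd
      rw [List.foldl_cons]
      by_cases hk : k = "custom_fields"
      · subst hk
        have htc : ((t.map Prod.fst).contains "custom_fields") = false := by
          simp [hk_notin]
        by_cases hc : d.contains "custom_fields" = true
        · have hval : (PySem.Dict.ofList (("custom_fields", v) :: t)).getD "custom_fields" [] = v := by
            rw [PySem.Dict.getD_eq_get?_getD,
              show PySem.Dict.ofList (("custom_fields", v) :: t)
                = (PySem.Dict.empty.insert "custom_fields" v).update t from rfl,
              pv_get?_update_of_not_mem t _ "custom_fields" hk_notin, PySem.Dict.get?_insert_self]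
            rfl
          simp only [beq_self_eq_true, Bool.true_and, hc, if_true]
          rw [ih _ hnd_t, if_neg (by rw [htc, Bool.and_false]; simp), hval]
          rw [if_pos (by simp),
            show d.update (("custom_fields", v) :: t)
              = (d.insert "custom_fields" v).update t from rfl,
            pv_insert_update_comm t d "custom_fields"
              (((PySem.Dict.ofList (d.getD "custom_fields" [])).update v).items) hc hk_notin,
            pv_insert_update_comm t d "custom_fields" v hc hk_notin,
            PySem.Dict.insert_insert_self]
        · have hcf : d.contains "custom_fields" = false := Bool.eq_false_iff.mpr hc
          simp only [beq_self_eq_true, Bool.true_and, hcf, Bool.false_eq_true, if_false]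
          rw [ih _ hnd_t, if_neg (by rw [htc, Bool.and_false]; simp), if_neg (by simp)]
          rfl
      · have hbeq : (k == "custom_fields") = false := by simp [hk]
        have hbeq2 : ("custom_fields" == k) = false := by simp [Ne.symm hk]
        have hget : (PySem.Dict.ofList ((k, v) :: t)).getD "custom_fields" [] =
            (PySem.Dict.ofList t).getD "custom_fields" [] :=
          pv_getD_ofList_cons_ne (k, v) t "custom_fields" [] (Ne.symm hk)
        simp only [hbeq, Bool.false_and, Bool.false_eq_true, if_false]
        rw [ih _ hnd_t, PySem.Dict.contains_insert, hbeq2, Bool.false_or,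
          PySem.Dict.getD_insert_of_ne _ _ _ (Ne.symm hk), hget,
          List.map_cons, List.contains_cons, hbeq2, Bool.false_or]
        rfl

-- the head and tail lists B concatenates have distinct keys, so dict() keeps them as-is
theorem pv_B_items (base overrides : List (String × List (String × String)))
    (hb : (base.map Prod.fst).Nodup) (ho : (overrides.map Prod.fst).Nodup) :
    merge_user_data_alt base overrides =
      base.map (fun kv => (kv.1, pvFinalValue base overrides kv.1)) ++
      overrides.filter (fun kv => !(PySem.Dict.ofList base).contains kv.1) := by
  apply pv_items_ofList
  rw [List.map_append, List.nodup_append]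
  refine ⟨by simpa using hb, (List.Sublist.map Prod.fst List.filter_sublist).nodup ho, ?_⟩
  · intro a ha b hbm
    simp only [List.map_map, List.mem_map, Function.comp] at ha
    obtain ⟨kv, hkv, rfl⟩ := ha
    simp only [List.mem_map] at hbm
    obtain ⟨kw, hkw, rfl⟩ := hbm
    have hkwc : (PySem.Dict.ofList base).contains kw.1 = false := by
      simpa using List.of_mem_filter hkw
    intro he
    rw [show PySem.Dict.ofList base = PySem.Dict.empty.update base from rfl,
      pv_contains_update, ← he] at hkwc
    simp [List.mem_map_of_mem (f := Prod.fst) hkv] at hkwc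

-- ===== VERDICT (by name: the statement is the Claim_ definition above) =====
theorem merge_user_data_spec : Claim_equal_merge_user_data := by
  intro base overrides _hdom hpre
  obtain ⟨hb, ho⟩ := hpre
  have hbitems : (PySem.Dict.ofList base).items = base := pv_items_ofList base hb
  have hbkeys : (PySem.Dict.ofList base).keys.Nodup := PySem.Dict.nodup_keys_ofList base
  have hcont_od : ∀ k, (PySem.Dict.ofList overrides).contains k
      = (overrides.map Prod.fst).contains k := by
    intro k
    rw [show PySem.Dict.ofList overrides = PySem.Dict.empty.update overrides from rfl,
      pv_contains_update]
    simp
  have hgetb : ∀ kv ∈ base, (PySem.Dict.ofList base).getD kv.1 [] = kv.2 := by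
    intro kv hkv
    exact PySem.Dict.getD_of_mem_items (PySem.Dict.ofList base)
      (by rw [hbitems]; exact hkv) hbkeys []
  unfold Spec_merge_user_data merge_user_data
  rw [pv_foldA_closed overrides (PySem.Dict.ofList base) ho,
    pv_B_items base overrides hb ho]
  by_cases hcase : ((PySem.Dict.ofList base).contains "custom_fields"
      && (overrides.map Prod.fst).contains "custom_fields") = true
  · rw [if_pos hcase]
    obtain ⟨hc1, hc2⟩ := Bool.and_eq_true_iff.mp hcase
    rw [PySem.Dict.items_insert_of_contains _ _
        (by rw [pv_contains_update, hc1]; simp),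
      pv_items_update overrides (PySem.Dict.ofList base) ho, List.map_append, hbitems,
      List.map_map]
    congr 1
    · apply List.map_congr_left
      intro kv hkv
      by_cases hk : kv.1 = "custom_fields"
      · simp only [Function.comp, hk, beq_self_eq_true, if_true, pvFinalValue,
          hcont_od, hc2, Bool.and_self]
      · have hbne : (kv.1 == "custom_fields") = false := by simp [hk]
        simp only [Function.comp, pvFinalValue, hbne, Bool.false_and, Bool.false_eq_true,
          if_false, hgetb kv hkv, PySem.Dict.getD_eq_get?_getD]
    · apply (List.map_congr_left ?_).trans (List.map_id _)
      intro kv hkv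
      have hkc : (PySem.Dict.ofList base).contains kv.1 = false := by
        have := List.of_mem_filter hkv
        simpa using this
      have hk : (kv.1 == "custom_fields") = false := by
        by_contra h
        rw [Bool.not_eq_false, beq_iff_eq] at h
        rw [h, hc1] at hkc
        exact absurd hkc (by decide)
      simp [hk]
  · rw [if_neg hcase,
      pv_items_update overrides (PySem.Dict.ofList base) ho, hbitems]
    congr 1
    apply List.map_congr_left
    intro kv hkv
    by_cases hk : kv.1 = "custom_fields"
    · have hc1 : (PySem.Dict.ofList base).contains "custom_fields" = true := by
        rw [show PySem.Dict.ofList base = PySem.Dict.empty.update base from rfl,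
          pv_contains_update]
        have : kv.1 ∈ base.map Prod.fst := List.mem_map_of_mem hkv
        rw [hk] at this
        simp [this]
      have hc2 : ((overrides.map Prod.fst).contains "custom_fields") = false := by
        by_contra h
        rw [Bool.not_eq_false] at h
        exact hcase (by rw [hc1, h]; rfl)
      have h2 : ((PySem.Dict.ofList base).get? "custom_fields").getD [] = kv.2 := by
        rw [← PySem.Dict.getD_eq_get?_getD, ← hk, hgetb kv hkv]
      simp only [pvFinalValue, hk, beq_self_eq_true, Bool.true_and, hcont_od, hc2,
        Bool.false_eq_true, if_false, PySem.Dict.getD_eq_get?_getD, h2]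
    · have hbne : (kv.1 == "custom_fields") = false := by simp [hk]
      have h2 : ((PySem.Dict.ofList base).get? kv.1).getD [] = kv.2 := by
        rw [← PySem.Dict.getD_eq_get?_getD, hgetb kv hkv]
      simp only [pvFinalValue, hbne, Bool.false_and, Bool.false_eq_true, if_false,
        PySem.Dict.getD_eq_get?_getD, h2]
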